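-- pv_equiv track=rewrite | github.com/tinusleroux/crowdbiz_graph | analyze_team_departments.py | analyze_and_suggest_departments
-- ===== SOURCE A (Python) =====
-- def analyze_and_suggest_departments(job_titles):
--     """Analyze job titles and suggest department categories"""
--
--     # Define department mapping based on common sports organization structure
--     department_keywords = {
--         "Sales & Partnerships": [
--             "sales", "partnership", "sponsor", "corporate", "revenue", "account", "business development",
--             "commercial", "marketing partnership", "corporate partnership"
--         ],
--         "Ticketing & Customer Service": [
--             "ticket", "customer", "service", "box office", "season ticket", "premium services",
--             "hospitality", "customer experience", "guest services"
--         ],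
--         "Marketing & Communications": [
--             "marketing", "communication", "brand", "content", "social media", "public relations",
--             "pr", "digital", "creative", "advertising", "media relations", "community relations"
--         ],
--         "Fan Experience & Events": [
--             "fan", "experience", "event", "game day", "entertainment", "fan engagement",
--             "community", "outreach", "promotions", "activation", "fan services"
--         ],
--         "Operations & Facilities": [
--             "operations", "facility", "maintenance", "security", "logistics", "stadium",
--             "arena", "venue", "game operations", "facilities", "equipment"
--         ],
--         "Finance & Administration": [
--             "finance", "accounting", "controller", "financial", "admin", "hr", "human resources",
--             "payroll", "budget", "analyst", "coordinator", "assistant"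
--         ],
--         "Baseball Operations": [
--             "baseball operations", "player development", "scouting", "minor league",
--             "farm system", "roster", "baseball", "player personnel"
--         ],
--         "Broadcasting & Media": [
--             "broadcast", "media", "radio", "television", "tv", "production", "commentary",
--             "announcer", "media relations", "digital media"
--         ],
--         "Technology & Analytics": [
--             "technology", "it", "data", "analytics", "digital", "systems", "tech",
--             "information technology", "data analyst", "software"
--         ],
--         "Legal & Compliance": [
--             "legal", "counsel", "compliance", "risk", "contracts", "attorney", "lawyer"
--         ]
--     }
--
--     # Categorize job titles
--     categorized = {dept: [] for dept in department_keywords.keys()}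
--     uncategorized = []
--
--     for title in job_titles:
--         title_lower = title.lower()
--         matched = False
--
--         for dept, keywords in department_keywords.items():
--             if any(keyword in title_lower for keyword in keywords):
--                 categorized[dept].append(title)
--                 matched = True
--                 break
--
--         if not matched:
--             uncategorized.append(title)
--
--     # Add uncategorized section
--     if uncategorized:
--         categorized["Other/Uncategorized"] = uncategorized
--
--     # Remove empty categories
--     return {k: v for k, v in categorized.items() if v}
-- ===== SOURCE B (Python) =====
-- # Department-major re-implementation: stateless comprehensions per department
-- # instead of a per-title loop with break and dict mutation.
--
-- DEPARTMENTS = [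
--     ("Sales & Partnerships", [
--         "sales", "partnership", "sponsor", "corporate", "revenue", "account", "business development",
--         "commercial", "marketing partnership", "corporate partnership"
--     ]),
--     ("Ticketing & Customer Service", [
--         "ticket", "customer", "service", "box office", "season ticket", "premium services",
--         "hospitality", "customer experience", "guest services"
--     ]),
--     ("Marketing & Communications", [
--         "marketing", "communication", "brand", "content", "social media", "public relations",
--         "pr", "digital", "creative", "advertising", "media relations", "community relations"
--     ]),
--     ("Fan Experience & Events", [
--         "fan", "experience", "event", "game day", "entertainment", "fan engagement",
--         "community", "outreach", "promotions", "activation", "fan services"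
--     ]),
--     ("Operations & Facilities", [
--         "operations", "facility", "maintenance", "security", "logistics", "stadium",
--         "arena", "venue", "game operations", "facilities", "equipment"
--     ]),
--     ("Finance & Administration", [
--         "finance", "accounting", "controller", "financial", "admin", "hr", "human resources",
--         "payroll", "budget", "analyst", "coordinator", "assistant"
--     ]),
--     ("Baseball Operations", [
--         "baseball operations", "player development", "scouting", "minor league",
--         "farm system", "roster", "baseball", "player personnel"
--     ]),
--     ("Broadcasting & Media", [
--         "broadcast", "media", "radio", "television", "tv", "production", "commentary",
--         "announcer", "media relations", "digital media"
--     ]),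
--     ("Technology & Analytics", [
--         "technology", "it", "data", "analytics", "digital", "systems", "tech",
--         "information technology", "data analyst", "software"
--     ]),
--     ("Legal & Compliance", [
--         "legal", "counsel", "compliance", "risk", "contracts", "attorney", "lawyer"
--     ]),
-- ]
--
--
-- def _matches(title_lower, keywords):
--     return any(kw in title_lower for kw in keywords)
--
--
-- def analyze_and_suggest_departments(job_titles):
--     """Analyze job titles and suggest department categories"""
--     rows = [[_matches(t.lower(), kws) for _, kws in DEPARTMENTS] for t in job_titles]
--     result = {}
--     for j, (dept, _) in enumerate(DEPARTMENTS):
--         bucket = [t for t, mm in zip(job_titles, rows) if mm[j] and not any(mm[:j])]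
--         if bucket:
--             result[dept] = bucket
--     leftover = [t for t, mm in zip(job_titles, rows) if not any(mm)]
--     if leftover:
--         result["Other/Uncategorized"] = leftover
--     return result
-- ===== Notes on version B (the rewrite author's own statement) =====
-- stated objective: alternative
-- what changed: Replaced the title-major loop (inner department scan with break, mutating a pre-initialized dict and a matched flag) by a department-major pass: a per-title boolean match-row is precomputed once, then for each department a stateless comprehension collects the titles whose row is true there and false for all earlier departments, so the dict of empty lists, the break and the mutation disappear.
import Mathlib
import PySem

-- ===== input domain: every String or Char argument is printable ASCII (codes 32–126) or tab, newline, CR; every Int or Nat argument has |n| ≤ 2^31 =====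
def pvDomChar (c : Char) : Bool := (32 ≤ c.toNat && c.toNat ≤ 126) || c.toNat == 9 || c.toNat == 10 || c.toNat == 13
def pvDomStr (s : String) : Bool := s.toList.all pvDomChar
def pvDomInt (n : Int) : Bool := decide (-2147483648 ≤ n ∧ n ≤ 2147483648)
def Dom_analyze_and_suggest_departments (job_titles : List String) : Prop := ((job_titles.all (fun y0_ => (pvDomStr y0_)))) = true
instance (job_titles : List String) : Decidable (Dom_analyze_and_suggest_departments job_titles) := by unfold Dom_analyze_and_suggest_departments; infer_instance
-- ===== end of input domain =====

-- B replaces A's title-major loop (inner keyword scan with break, mutating a pre-initialized dict)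
-- by department-major stateless comprehensions; objective: alternative decomposition, same results.

-- shared constant: the department → keywords table, in A's dict insertion order
def pvDeptTable : List (String × List String) := [
  ("Sales & Partnerships", ["sales", "partnership", "sponsor", "corporate", "revenue", "account", "business development", "commercial", "marketing partnership", "corporate partnership"]),
  ("Ticketing & Customer Service", ["ticket", "customer", "service", "box office", "season ticket", "premium services", "hospitality", "customer experience", "guest services"]),
  ("Marketing & Communications", ["marketing", "communication", "brand", "content", "social media", "public relations", "pr", "digital", "creative", "advertising", "media relations", "community relations"]),
  ("Fan Experience & Events", ["fan", "experience", "event", "game day", "entertainment", "fan engagement", "community", "outreach", "promotions", "activation", "fan services"]),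
  ("Operations & Facilities", ["operations", "facility", "maintenance", "security", "logistics", "stadium", "arena", "venue", "game operations", "facilities", "equipment"]),
  ("Finance & Administration", ["finance", "accounting", "controller", "financial", "admin", "hr", "human resources", "payroll", "budget", "analyst", "coordinator", "assistant"]),
  ("Baseball Operations", ["baseball operations", "player development", "scouting", "minor league", "farm system", "roster", "baseball", "player personnel"]),
  ("Broadcasting & Media", ["broadcast", "media", "radio", "television", "tv", "production", "commentary", "announcer", "media relations", "digital media"]),
  ("Technology & Analytics", ["technology", "it", "data", "analytics", "digital", "systems", "tech", "information technology", "data analyst", "software"]),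
  ("Legal & Compliance", ["legal", "counsel", "compliance", "risk", "contracts", "attorney", "lawyer"])]

-- ===== PORT A =====
-- A's inner `for dept, keywords …: if any(…): …; break` — the break is the recursion stopping
def pvFirstDeptA (title_lower : String) : List (String × List String) → Option String
  | [] => none
  | (dept, kws) :: rest =>
      if kws.any (fun kw => PySem.Str.isIn kw title_lower) then some dept
      else pvFirstDeptA title_lower rest

-- one iteration of A's `for title in job_titles` loop; state = (categorized, uncategorized)
def pvStepA (st : PySem.Dict String (List String) × List String) (title : String) :
    PySem.Dict String (List String) × List String :=
  let title_lower := PySem.Str.lower title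
  match pvFirstDeptA title_lower pvDeptTable with
  | some dept => (st.1.modify dept [] (fun v => v ++ [title]), st.2)
  | none => (st.1, st.2 ++ [title])

def analyze_and_suggest_departments (job_titles : List String) : List (String × List String) :=
  let init : PySem.Dict String (List String) :=
    pvDeptTable.foldl (fun d p => d.insert p.1 []) PySem.Dict.empty
  let st := job_titles.foldl pvStepA (init, [])
  let categorized := if !st.2.isEmpty then st.1.insert "Other/Uncategorized" st.2 else st.1
  categorized.items.filter (fun kv => !kv.2.isEmpty)

-- ===== PORT B =====
def pvMatches (low : String) (kws : List String) : Bool :=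
  kws.any (fun kw => PySem.Str.isIn kw low)

-- DEPARTMENTS[:j] for the enumerate index j ≥ 0 is List.take j.toNat
def analyze_and_suggest_departments_alt (job_titles : List String) : List (String × List String) :=
  let pairs := job_titles.zip (job_titles.map PySem.Str.lower)
  let result := (PySem.List.enumerate pvDeptTable).foldl
    (fun res jd =>
      let bucket := (pairs.filter (fun p => pvMatches p.2 jd.2.2 &&
          !((pvDeptTable.take jd.1.toNat).any (fun d' => pvMatches p.2 d'.2)))).map (·.1)
      if !bucket.isEmpty then res ++ [(jd.2.1, bucket)] else res)
    []
  let leftover := (pairs.filter (fun p =>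
      !(pvDeptTable.any (fun d' => pvMatches p.2 d'.2)))).map (·.1)
  if !leftover.isEmpty then result ++ [("Other/Uncategorized", leftover)] else result

-- ===== PRECONDITION & SPEC =====
def Spec_analyze_and_suggest_departments (job_titles : List String) (out : List (String × List String)) : Prop := out = analyze_and_suggest_departments_alt job_titles
instance (job_titles : List String) (out : List (String × List String)) : Decidable (Spec_analyze_and_suggest_departments job_titles out) := by unfold Spec_analyze_and_suggest_departments; infer_instance

-- ===== CLAIM (what is proved, stated in full; the proofs are below) =====
def Claim_equal_analyze_and_suggest_departments : Prop := ∀ (job_titles : List String), Dom_analyze_and_suggest_departments job_titles → Spec_analyze_and_suggest_departments job_titles (analyze_and_suggest_departments job_titles)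

-- ===== LEMMAS AND PROOFS =====

-- first matching department of a title (A's inner loop applied to the lowered title)
def pvFm (t : String) : Option String := pvFirstDeptA (PySem.Str.lower t) pvDeptTable

theorem pv_zip_filter_map (ts : List String) (q : String → Bool) :
    ((ts.zip (ts.map PySem.Str.lower)).filter (fun p => q p.2)).map (·.1)
      = ts.filter (fun t => q (PySem.Str.lower t)) := by
  induction ts with
  | nil => rfl
  | cons t ts ih =>
      simp only [List.map_cons, List.zip_cons_cons, List.filter_cons]
      by_cases h : q (PySem.Str.lower t) <;> simp [h, ih]

theorem pvFirstDeptA_ne_of_not_key (low d : String) :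
    ∀ l : List (String × List String), d ∉ l.map (·.1) → pvFirstDeptA low l ≠ some d := by
  intro l
  induction l with
  | nil => simp [pvFirstDeptA]
  | cons p rest ih =>
      intro h
      simp only [List.map_cons, List.mem_cons, not_or] at h
      obtain ⟨h1, h2⟩ := h
      simp only [pvFirstDeptA]
      split
      · simp
        intro he
        exact h1 he.symm
      · exact ih h2

theorem pvFirstDeptA_mem (low d : String) (l : List (String × List String))
    (h : pvFirstDeptA low l = some d) : d ∈ l.map (·.1) := by
  by_contra hc
  exact pvFirstDeptA_ne_of_not_key low d l hc h

theorem pvFirstDeptA_spec (low : String) (post : List (String × List String))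
    (d : String) (kws : List String) (hpost : d ∉ post.map (·.1)) :
    ∀ pre : List (String × List String), d ∉ pre.map (·.1) →
    (pvFirstDeptA low (pre ++ (d, kws) :: post) == some d)
      = (pvMatches low kws && !(pre.any (fun p => pvMatches low p.2))) := by
  intro pre
  induction pre with
  | nil =>
      intro _
      simp only [List.nil_append, pvFirstDeptA, List.any_nil, Bool.not_false, Bool.and_true]
      by_cases h : (kws.any fun kw => PySem.Str.isIn kw low) = true
      · rw [if_pos h, show pvMatches low kws = true from h]
        simp
      · rw [if_neg h]
        rw [Bool.not_eq_true] at h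
        rw [show pvMatches low kws = false from h]
        exact beq_eq_false_iff_ne.mpr (pvFirstDeptA_ne_of_not_key low d post hpost)
  | cons p rest ih =>
      intro hpre
      simp only [List.map_cons, List.mem_cons, not_or] at hpre
      obtain ⟨h1, h2⟩ := hpre
      rcases p with ⟨pk, pkws⟩
      simp only [List.cons_append, pvFirstDeptA, List.any_cons]
      by_cases hm : (pkws.any fun kw => PySem.Str.isIn kw low) = true
      · rw [if_pos hm, show pvMatches low (pk, pkws).2 = true from hm]
        have : (some pk == some d) = false := by
          apply beq_eq_false_iff_ne.mpr
          intro he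
          exact h1 (by simpa using he.symm)
        simp [this]
      · rw [if_neg hm]
        rw [Bool.not_eq_true] at hm
        rw [show pvMatches low (pk, pkws).2 = false from hm, ih h2]
        simp

theorem pvFm_none (low : String) (l : List (String × List String)) :
    (pvFirstDeptA low l).isNone = !(l.any (fun d => pvMatches low d.2)) := by
  induction l with
  | nil => simp [pvFirstDeptA]
  | cons p rest ih =>
      rcases p with ⟨pk, pkws⟩
      simp only [pvFirstDeptA, List.any_cons]
      by_cases h : (pkws.any fun kw => PySem.Str.isIn kw low) = true
      · rw [if_pos h, show pvMatches low (pk, pkws).2 = true from h]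
        simp
      · rw [if_neg h]
        rw [Bool.not_eq_true] at h
        rw [show pvMatches low (pk, pkws).2 = false from h, ih]
        simp

-- loop invariant of A's title loop
theorem pvA_inv (ts : List String) :
    ts.foldl pvStepA
        (PySem.Dict.mk (pvDeptTable.map (fun p => (p.1, ([] : List String)))), []) =
      (PySem.Dict.mk (pvDeptTable.map
          (fun p => (p.1, ts.filter (fun t => pvFm t == some p.1)))),
       ts.filter (fun t => (pvFm t).isNone)) := by
  induction ts using List.reverseRecOn with
  | nil => simp
  | append_singleton ts t ih =>
      rw [List.foldl_append, ih]
      simp only [List.foldl_cons, List.foldl_nil, pvStepA]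
      rcases hfm : pvFirstDeptA (PySem.Str.lower t) pvDeptTable with _ | d
      · simp [List.filter_append, pvFm, hfm]
      · have hfm' : pvFm t = some d := hfm
        have hd := pvFirstDeptA_mem _ _ _ hfm
        simp only [pvDeptTable, List.map_cons, List.map_nil, List.mem_cons,
          List.not_mem_nil, or_false] at hd
        rcases hd with h | h | h | h | h | h | h | h | h | h <;> subst h <;>
          · apply Prod.ext
            · apply PySem.Dict.ext
              simp [PySem.Dict.modify, PySem.Dict.items_insert, pvDeptTable,
                PySem.Dict.getD_eq_get?_getD, PySem.Dict.get?_mk_cons,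
                List.filter_append, hfm']
            · simp [List.filter_append, hfm']

-- B's per-department bucket is exactly the set of titles whose first match is that department
theorem pv_bucket_eq (ts : List String) (d : String) (kws : List String)
    (pre post : List (String × List String))
    (htab : pvDeptTable = pre ++ (d, kws) :: post)
    (hpre : d ∉ pre.map (·.1)) (hpost : d ∉ post.map (·.1)) :
    (((ts.zip (ts.map PySem.Str.lower)).filter (fun p => pvMatches p.2 kws &&
        !(pre.any (fun d' => pvMatches p.2 d'.2)))).map (·.1))
      = ts.filter (fun t => pvFm t == some d) := by
  have h1 : (((ts.zip (ts.map PySem.Str.lower)).filter (fun p => pvMatches p.2 kws &&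
        !(pre.any (fun d' => pvMatches p.2 d'.2)))).map (·.1))
      = ts.filter (fun t => pvMatches (PySem.Str.lower t) kws &&
        !(pre.any (fun d' => pvMatches (PySem.Str.lower t) d'.2))) :=
    pv_zip_filter_map ts (fun low => pvMatches low kws && !(pre.any (fun d' => pvMatches low d'.2)))
  rw [h1]
  apply List.filter_congr
  intro t _
  rw [pvFm, htab, pvFirstDeptA_spec _ _ _ _ hpost _ hpre]

theorem pv_init_eq :
    pvDeptTable.foldl (fun d p => d.insert p.1 []) PySem.Dict.empty =
      PySem.Dict.mk (pvDeptTable.map (fun p => (p.1, ([] : List String)))) := by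
  decide

theorem pv_henum : PySem.List.enumerate pvDeptTable = [
  ((0 : Int), ("Sales & Partnerships", ["sales", "partnership", "sponsor", "corporate", "revenue", "account", "business development", "commercial", "marketing partnership", "corporate partnership"])),
  ((1 : Int), ("Ticketing & Customer Service", ["ticket", "customer", "service", "box office", "season ticket", "premium services", "hospitality", "customer experience", "guest services"])),
  ((2 : Int), ("Marketing & Communications", ["marketing", "communication", "brand", "content", "social media", "public relations", "pr", "digital", "creative", "advertising", "media relations", "community relations"])),
  ((3 : Int), ("Fan Experience & Events", ["fan", "experience", "event", "game day", "entertainment", "fan engagement", "community", "outreach", "promotions", "activation", "fan services"])),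
  ((4 : Int), ("Operations & Facilities", ["operations", "facility", "maintenance", "security", "logistics", "stadium", "arena", "venue", "game operations", "facilities", "equipment"])),
  ((5 : Int), ("Finance & Administration", ["finance", "accounting", "controller", "financial", "admin", "hr", "human resources", "payroll", "budget", "analyst", "coordinator", "assistant"])),
  ((6 : Int), ("Baseball Operations", ["baseball operations", "player development", "scouting", "minor league", "farm system", "roster", "baseball", "player personnel"])),
  ((7 : Int), ("Broadcasting & Media", ["broadcast", "media", "radio", "television", "tv", "production", "commentary", "announcer", "media relations", "digital media"])),
  ((8 : Int), ("Technology & Analytics", ["technology", "it", "data", "analytics", "digital", "systems", "tech", "information technology", "data analyst", "software"])),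
  ((9 : Int), ("Legal & Compliance", ["legal", "counsel", "compliance", "risk", "contracts", "attorney", "lawyer"]))] := by decide

theorem pv_htab : pvDeptTable = [
  (("Sales & Partnerships" : String), ["sales", "partnership", "sponsor", "corporate", "revenue", "account", "business development", "commercial", "marketing partnership", "corporate partnership"]),
  (("Ticketing & Customer Service" : String), ["ticket", "customer", "service", "box office", "season ticket", "premium services", "hospitality", "customer experience", "guest services"]),
  (("Marketing & Communications" : String), ["marketing", "communication", "brand", "content", "social media", "public relations", "pr", "digital", "creative", "advertising", "media relations", "community relations"]),
  (("Fan Experience & Events" : String), ["fan", "experience", "event", "game day", "entertainment", "fan engagement", "community", "outreach", "promotions", "activation", "fan services"]),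
  (("Operations & Facilities" : String), ["operations", "facility", "maintenance", "security", "logistics", "stadium", "arena", "venue", "game operations", "facilities", "equipment"]),
  (("Finance & Administration" : String), ["finance", "accounting", "controller", "financial", "admin", "hr", "human resources", "payroll", "budget", "analyst", "coordinator", "assistant"]),
  (("Baseball Operations" : String), ["baseball operations", "player development", "scouting", "minor league", "farm system", "roster", "baseball", "player personnel"]),
  (("Broadcasting & Media" : String), ["broadcast", "media", "radio", "television", "tv", "production", "commentary", "announcer", "media relations", "digital media"]),
  (("Technology & Analytics" : String), ["technology", "it", "data", "analytics", "digital", "systems", "tech", "information technology", "data analyst", "software"]),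
  (("Legal & Compliance" : String), ["legal", "counsel", "compliance", "risk", "contracts", "attorney", "lawyer"])] := rfl

-- ===== VERDICT (by name: the statement is the Claim_ definition above) =====
theorem analyze_and_suggest_departments_spec : Claim_equal_analyze_and_suggest_departments := by
  intro ts _
  unfold Spec_analyze_and_suggest_departments
  unfold analyze_and_suggest_departments analyze_and_suggest_departments_alt
  dsimp only
  rw [pv_init_eq, pvA_inv]
  rw [PySem.List.foldl_append_if
    (fun jd : Int × (String × List String) =>
      !(((ts.zip (ts.map PySem.Str.lower)).filter (fun p => pvMatches p.2 jd.2.2 &&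
          !((pvDeptTable.take jd.1.toNat).any (fun d' => pvMatches p.2 d'.2)))).map (·.1)).isEmpty)
    (fun jd => (jd.2.1,
      ((ts.zip (ts.map PySem.Str.lower)).filter (fun p => pvMatches p.2 jd.2.2 &&
          !((pvDeptTable.take jd.1.toNat).any (fun d' => pvMatches p.2 d'.2)))).map (·.1)))]
  rw [pv_henum]
  have hleft : List.map (fun x => x.1) (List.filter (fun p => !pvDeptTable.any fun d' => pvMatches p.2 d'.2) (ts.zip (List.map PySem.Str.lower ts))) = List.filter (fun t => (pvFm t).isNone) ts := by
    have h1 : List.map (fun x => x.1) (List.filter (fun p => !pvDeptTable.any fun d' => pvMatches p.2 d'.2) (ts.zip (List.map PySem.Str.lower ts))) = ts.filter (fun t => !pvDeptTable.any fun d' => pvMatches (PySem.Str.lower t) d'.2) :=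
      pv_zip_filter_map ts (fun low => !pvDeptTable.any fun d' => pvMatches low d'.2)
    rw [h1]
    apply List.filter_congr
    intro t _
    exact (pvFm_none (PySem.Str.lower t) pvDeptTable).symm
  have hb0 : List.map (fun x => x.1) (List.filter (fun p => pvMatches p.2 ["sales", "partnership", "sponsor", "corporate", "revenue", "account", "business development", "commercial", "marketing partnership", "corporate partnership"] && !(List.take (Int.toNat 0) pvDeptTable).any fun d' => pvMatches p.2 d'.2) (ts.zip (List.map PySem.Str.lower ts))) = List.filter (fun t => pvFm t == some "Sales & Partnerships") ts :=
    pv_bucket_eq ts "Sales & Partnerships" ["sales", "partnership", "sponsor", "corporate", "revenue", "account", "business development", "commercial", "marketing partnership", "corporate partnership"] (List.take (Int.toNat 0) pvDeptTable) (List.drop 1 pvDeptTable) rfl (by decide) (by decide)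
  have hb1 : List.map (fun x => x.1) (List.filter (fun p => pvMatches p.2 ["ticket", "customer", "service", "box office", "season ticket", "premium services", "hospitality", "customer experience", "guest services"] && !(List.take (Int.toNat 1) pvDeptTable).any fun d' => pvMatches p.2 d'.2) (ts.zip (List.map PySem.Str.lower ts))) = List.filter (fun t => pvFm t == some "Ticketing & Customer Service") ts :=
    pv_bucket_eq ts "Ticketing & Customer Service" ["ticket", "customer", "service", "box office", "season ticket", "premium services", "hospitality", "customer experience", "guest services"] (List.take (Int.toNat 1) pvDeptTable) (List.drop 2 pvDeptTable) rfl (by decide) (by decide)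
  have hb2 : List.map (fun x => x.1) (List.filter (fun p => pvMatches p.2 ["marketing", "communication", "brand", "content", "social media", "public relations", "pr", "digital", "creative", "advertising", "media relations", "community relations"] && !(List.take (Int.toNat 2) pvDeptTable).any fun d' => pvMatches p.2 d'.2) (ts.zip (List.map PySem.Str.lower ts))) = List.filter (fun t => pvFm t == some "Marketing & Communications") ts :=
    pv_bucket_eq ts "Marketing & Communications" ["marketing", "communication", "brand", "content", "social media", "public relations", "pr", "digital", "creative", "advertising", "media relations", "community relations"] (List.take (Int.toNat 2) pvDeptTable) (List.drop 3 pvDeptTable) rfl (by decide) (by decide)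
  have hb3 : List.map (fun x => x.1) (List.filter (fun p => pvMatches p.2 ["fan", "experience", "event", "game day", "entertainment", "fan engagement", "community", "outreach", "promotions", "activation", "fan services"] && !(List.take (Int.toNat 3) pvDeptTable).any fun d' => pvMatches p.2 d'.2) (ts.zip (List.map PySem.Str.lower ts))) = List.filter (fun t => pvFm t == some "Fan Experience & Events") ts :=
    pv_bucket_eq ts "Fan Experience & Events" ["fan", "experience", "event", "game day", "entertainment", "fan engagement", "community", "outreach", "promotions", "activation", "fan services"] (List.take (Int.toNat 3) pvDeptTable) (List.drop 4 pvDeptTable) rfl (by decide) (by decide)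
  have hb4 : List.map (fun x => x.1) (List.filter (fun p => pvMatches p.2 ["operations", "facility", "maintenance", "security", "logistics", "stadium", "arena", "venue", "game operations", "facilities", "equipment"] && !(List.take (Int.toNat 4) pvDeptTable).any fun d' => pvMatches p.2 d'.2) (ts.zip (List.map PySem.Str.lower ts))) = List.filter (fun t => pvFm t == some "Operations & Facilities") ts :=
    pv_bucket_eq ts "Operations & Facilities" ["operations", "facility", "maintenance", "security", "logistics", "stadium", "arena", "venue", "game operations", "facilities", "equipment"] (List.take (Int.toNat 4) pvDeptTable) (List.drop 5 pvDeptTable) rfl (by decide) (by decide)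
  have hb5 : List.map (fun x => x.1) (List.filter (fun p => pvMatches p.2 ["finance", "accounting", "controller", "financial", "admin", "hr", "human resources", "payroll", "budget", "analyst", "coordinator", "assistant"] && !(List.take (Int.toNat 5) pvDeptTable).any fun d' => pvMatches p.2 d'.2) (ts.zip (List.map PySem.Str.lower ts))) = List.filter (fun t => pvFm t == some "Finance & Administration") ts :=
    pv_bucket_eq ts "Finance & Administration" ["finance", "accounting", "controller", "financial", "admin", "hr", "human resources", "payroll", "budget", "analyst", "coordinator", "assistant"] (List.take (Int.toNat 5) pvDeptTable) (List.drop 6 pvDeptTable) rfl (by decide) (by decide)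
  have hb6 : List.map (fun x => x.1) (List.filter (fun p => pvMatches p.2 ["baseball operations", "player development", "scouting", "minor league", "farm system", "roster", "baseball", "player personnel"] && !(List.take (Int.toNat 6) pvDeptTable).any fun d' => pvMatches p.2 d'.2) (ts.zip (List.map PySem.Str.lower ts))) = List.filter (fun t => pvFm t == some "Baseball Operations") ts :=
    pv_bucket_eq ts "Baseball Operations" ["baseball operations", "player development", "scouting", "minor league", "farm system", "roster", "baseball", "player personnel"] (List.take (Int.toNat 6) pvDeptTable) (List.drop 7 pvDeptTable) rfl (by decide) (by decide)
  have hb7 : List.map (fun x => x.1) (List.filter (fun p => pvMatches p.2 ["broadcast", "media", "radio", "television", "tv", "production", "commentary", "announcer", "media relations", "digital media"] && !(List.take (Int.toNat 7) pvDeptTable).any fun d' => pvMatches p.2 d'.2) (ts.zip (List.map PySem.Str.lower ts))) = List.filter (fun t => pvFm t == some "Broadcasting & Media") ts :=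
    pv_bucket_eq ts "Broadcasting & Media" ["broadcast", "media", "radio", "television", "tv", "production", "commentary", "announcer", "media relations", "digital media"] (List.take (Int.toNat 7) pvDeptTable) (List.drop 8 pvDeptTable) rfl (by decide) (by decide)
  have hb8 : List.map (fun x => x.1) (List.filter (fun p => pvMatches p.2 ["technology", "it", "data", "analytics", "digital", "systems", "tech", "information technology", "data analyst", "software"] && !(List.take (Int.toNat 8) pvDeptTable).any fun d' => pvMatches p.2 d'.2) (ts.zip (List.map PySem.Str.lower ts))) = List.filter (fun t => pvFm t == some "Technology & Analytics") ts :=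
    pv_bucket_eq ts "Technology & Analytics" ["technology", "it", "data", "analytics", "digital", "systems", "tech", "information technology", "data analyst", "software"] (List.take (Int.toNat 8) pvDeptTable) (List.drop 9 pvDeptTable) rfl (by decide) (by decide)
  have hb9 : List.map (fun x => x.1) (List.filter (fun p => pvMatches p.2 ["legal", "counsel", "compliance", "risk", "contracts", "attorney", "lawyer"] && !(List.take (Int.toNat 9) pvDeptTable).any fun d' => pvMatches p.2 d'.2) (ts.zip (List.map PySem.Str.lower ts))) = List.filter (fun t => pvFm t == some "Legal & Compliance") ts :=
    pv_bucket_eq ts "Legal & Compliance" ["legal", "counsel", "compliance", "risk", "contracts", "attorney", "lawyer"] (List.take (Int.toNat 9) pvDeptTable) (List.drop 10 pvDeptTable) rfl (by decide) (by decide)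
  have hstep : List.map (fun jd : Int × (String × List String) => (jd.2.1, List.map (fun x => x.1) (List.filter (fun p => pvMatches p.2 jd.2.2 && !(List.take jd.1.toNat pvDeptTable).any fun d' => pvMatches p.2 d'.2) (ts.zip (List.map PySem.Str.lower ts))))) (List.filter (fun jd : Int × (String × List String) => !(List.map (fun x => x.1) (List.filter (fun p => pvMatches p.2 jd.2.2 && !(List.take jd.1.toNat pvDeptTable).any fun d' => pvMatches p.2 d'.2) (ts.zip (List.map PySem.Str.lower ts)))).isEmpty) [
    ((0 : Int), ("Sales & Partnerships", ["sales", "partnership", "sponsor", "corporate", "revenue", "account", "business development", "commercial", "marketing partnership", "corporate partnership"])),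
    ((1 : Int), ("Ticketing & Customer Service", ["ticket", "customer", "service", "box office", "season ticket", "premium services", "hospitality", "customer experience", "guest services"])),
    ((2 : Int), ("Marketing & Communications", ["marketing", "communication", "brand", "content", "social media", "public relations", "pr", "digital", "creative", "advertising", "media relations", "community relations"])),
    ((3 : Int), ("Fan Experience & Events", ["fan", "experience", "event", "game day", "entertainment", "fan engagement", "community", "outreach", "promotions", "activation", "fan services"])),
    ((4 : Int), ("Operations & Facilities", ["operations", "facility", "maintenance", "security", "logistics", "stadium", "arena", "venue", "game operations", "facilities", "equipment"])),
    ((5 : Int), ("Finance & Administration", ["finance", "accounting", "controller", "financial", "admin", "hr", "human resources", "payroll", "budget", "analyst", "coordinator", "assistant"])),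
    ((6 : Int), ("Baseball Operations", ["baseball operations", "player development", "scouting", "minor league", "farm system", "roster", "baseball", "player personnel"])),
    ((7 : Int), ("Broadcasting & Media", ["broadcast", "media", "radio", "television", "tv", "production", "commentary", "announcer", "media relations", "digital media"])),
    ((8 : Int), ("Technology & Analytics", ["technology", "it", "data", "analytics", "digital", "systems", "tech", "information technology", "data analyst", "software"])),
    ((9 : Int), ("Legal & Compliance", ["legal", "counsel", "compliance", "risk", "contracts", "attorney", "lawyer"]))]) = List.filter (fun kv : String × List String => !kv.2.isEmpty) (List.map (fun jd : Int × (String × List String) => (jd.2.1, List.map (fun x => x.1) (List.filter (fun p => pvMatches p.2 jd.2.2 && !(List.take jd.1.toNat pvDeptTable).any fun d' => pvMatches p.2 d'.2) (ts.zip (List.map PySem.Str.lower ts))))) [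
    ((0 : Int), ("Sales & Partnerships", ["sales", "partnership", "sponsor", "corporate", "revenue", "account", "business development", "commercial", "marketing partnership", "corporate partnership"])),
    ((1 : Int), ("Ticketing & Customer Service", ["ticket", "customer", "service", "box office", "season ticket", "premium services", "hospitality", "customer experience", "guest services"])),
    ((2 : Int), ("Marketing & Communications", ["marketing", "communication", "brand", "content", "social media", "public relations", "pr", "digital", "creative", "advertising", "media relations", "community relations"])),
    ((3 : Int), ("Fan Experience & Events", ["fan", "experience", "event", "game day", "entertainment", "fan engagement", "community", "outreach", "promotions", "activation", "fan services"])),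
    ((4 : Int), ("Operations & Facilities", ["operations", "facility", "maintenance", "security", "logistics", "stadium", "arena", "venue", "game operations", "facilities", "equipment"])),
    ((5 : Int), ("Finance & Administration", ["finance", "accounting", "controller", "financial", "admin", "hr", "human resources", "payroll", "budget", "analyst", "coordinator", "assistant"])),
    ((6 : Int), ("Baseball Operations", ["baseball operations", "player development", "scouting", "minor league", "farm system", "roster", "baseball", "player personnel"])),
    ((7 : Int), ("Broadcasting & Media", ["broadcast", "media", "radio", "television", "tv", "production", "commentary", "announcer", "media relations", "digital media"])),
    ((8 : Int), ("Technology & Analytics", ["technology", "it", "data", "analytics", "digital", "systems", "tech", "information technology", "data analyst", "software"])),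
    ((9 : Int), ("Legal & Compliance", ["legal", "counsel", "compliance", "risk", "contracts", "attorney", "lawyer"]))]) :=
    (List.filter_map (f := (fun jd : Int × (String × List String) => (jd.2.1, List.map (fun x => x.1) (List.filter (fun p => pvMatches p.2 jd.2.2 && !(List.take jd.1.toNat pvDeptTable).any fun d' => pvMatches p.2 d'.2) (ts.zip (List.map PySem.Str.lower ts)))))) (p := (fun kv : String × List String => !kv.2.isEmpty)) (l := [
    ((0 : Int), ("Sales & Partnerships", ["sales", "partnership", "sponsor", "corporate", "revenue", "account", "business development", "commercial", "marketing partnership", "corporate partnership"])),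
    ((1 : Int), ("Ticketing & Customer Service", ["ticket", "customer", "service", "box office", "season ticket", "premium services", "hospitality", "customer experience", "guest services"])),
    ((2 : Int), ("Marketing & Communications", ["marketing", "communication", "brand", "content", "social media", "public relations", "pr", "digital", "creative", "advertising", "media relations", "community relations"])),
    ((3 : Int), ("Fan Experience & Events", ["fan", "experience", "event", "game day", "entertainment", "fan engagement", "community", "outreach", "promotions", "activation", "fan services"])),
    ((4 : Int), ("Operations & Facilities", ["operations", "facility", "maintenance", "security", "logistics", "stadium", "arena", "venue", "game operations", "facilities", "equipment"])),
    ((5 : Int), ("Finance & Administration", ["finance", "accounting", "controller", "financial", "admin", "hr", "human resources", "payroll", "budget", "analyst", "coordinator", "assistant"])),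
    ((6 : Int), ("Baseball Operations", ["baseball operations", "player development", "scouting", "minor league", "farm system", "roster", "baseball", "player personnel"])),
    ((7 : Int), ("Broadcasting & Media", ["broadcast", "media", "radio", "television", "tv", "production", "commentary", "announcer", "media relations", "digital media"])),
    ((8 : Int), ("Technology & Analytics", ["technology", "it", "data", "analytics", "digital", "systems", "tech", "information technology", "data analyst", "software"])),
    ((9 : Int), ("Legal & Compliance", ["legal", "counsel", "compliance", "risk", "contracts", "attorney", "lawyer"]))])).symm
  have hmap : List.map (fun jd : Int × (String × List String) => (jd.2.1, List.map (fun x => x.1) (List.filter (fun p => pvMatches p.2 jd.2.2 && !(List.take jd.1.toNat pvDeptTable).any fun d' => pvMatches p.2 d'.2) (ts.zip (List.map PySem.Str.lower ts))))) [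
    ((0 : Int), ("Sales & Partnerships", ["sales", "partnership", "sponsor", "corporate", "revenue", "account", "business development", "commercial", "marketing partnership", "corporate partnership"])),
    ((1 : Int), ("Ticketing & Customer Service", ["ticket", "customer", "service", "box office", "season ticket", "premium services", "hospitality", "customer experience", "guest services"])),
    ((2 : Int), ("Marketing & Communications", ["marketing", "communication", "brand", "content", "social media", "public relations", "pr", "digital", "creative", "advertising", "media relations", "community relations"])),
    ((3 : Int), ("Fan Experience & Events", ["fan", "experience", "event", "game day", "entertainment", "fan engagement", "community", "outreach", "promotions", "activation", "fan services"])),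
    ((4 : Int), ("Operations & Facilities", ["operations", "facility", "maintenance", "security", "logistics", "stadium", "arena", "venue", "game operations", "facilities", "equipment"])),
    ((5 : Int), ("Finance & Administration", ["finance", "accounting", "controller", "financial", "admin", "hr", "human resources", "payroll", "budget", "analyst", "coordinator", "assistant"])),
    ((6 : Int), ("Baseball Operations", ["baseball operations", "player development", "scouting", "minor league", "farm system", "roster", "baseball", "player personnel"])),
    ((7 : Int), ("Broadcasting & Media", ["broadcast", "media", "radio", "television", "tv", "production", "commentary", "announcer", "media relations", "digital media"])),
    ((8 : Int), ("Technology & Analytics", ["technology", "it", "data", "analytics", "digital", "systems", "tech", "information technology", "data analyst", "software"])),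
    ((9 : Int), ("Legal & Compliance", ["legal", "counsel", "compliance", "risk", "contracts", "attorney", "lawyer"]))] = List.map (fun p : String × List String => (p.1, List.filter (fun t => pvFm t == some p.1) ts)) pvDeptTable := by
    conv_rhs => rw [pv_htab]
    simp only [List.map_cons, List.map_nil]
    rw [hb0, hb1, hb2, hb3, hb4, hb5, hb6, hb7, hb8, hb9]
  rw [hstep, hmap, hleft]
  by_cases hu : (List.filter (fun t => (pvFm t).isNone) ts).isEmpty = true
  · simp [hu]
  · rw [Bool.not_eq_true] at hu
    have hnc : (PySem.Dict.mk (List.map (fun p : String × List String => (p.1, List.filter (fun t => pvFm t == some p.1) ts)) pvDeptTable)).contains "Other/Uncategorized" = false := by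
      simp [PySem.Dict.contains_mk, pv_htab]
    simp only [hu, Bool.not_false, if_pos]
    rw [PySem.Dict.items_insert_of_not_contains _ _ hnc]
    rw [List.filter_append]
    simp [hu]
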